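-- pv_equiv track=rewrite | github.com/bigkreators/bigkreators.com | utils/slug.py | parse_slug_namespace
-- ===== SOURCE A (Python) =====
-- def parse_slug_namespace(slug: str) -> tuple[str, str]:
--     """
--     Parse namespace from a slug if present.
--
--     Args:
--         slug: The slug to parse
--
--     Returns:
--         tuple[str, str]: (namespace, remaining_slug) where namespace is empty for main namespace
--     """
--     # Known namespace prefixes in slugs
--     namespace_prefixes = ['category_', 'template_', 'help_', 'user_', 'file_', 'kryptopedia_']
--
--     slug_lower = slug.lower()
--     for prefix in namespace_prefixes:
--         if slug_lower.startswith(prefix):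
--             namespace = prefix.rstrip('_').capitalize()
--             remaining_slug = slug[len(prefix):]
--             return namespace, remaining_slug
--
--     # No namespace found
--     return "", slug
-- ===== SOURCE B (Python) =====
-- _NAMESPACES = {'category', 'template', 'help', 'user', 'file', 'kryptopedia'}
--
--
-- def parse_slug_namespace(slug: str) -> tuple[str, str]:
--     """One-shot tokenization: split at the first '_' and hash-look-up the head."""
--     head, sep, tail = slug.partition('_')
--     name = head.lower()
--     if sep and name in _NAMESPACES:
--         return name.capitalize(), tail
--     return "", slug
-- ===== Notes on version B (the rewrite author's own statement) =====
-- stated objective: idiomatic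
-- what changed: Replaces the six startswith scans over a prefix list by a single partition at the first underscore plus one set lookup of the head.
import Mathlib
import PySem

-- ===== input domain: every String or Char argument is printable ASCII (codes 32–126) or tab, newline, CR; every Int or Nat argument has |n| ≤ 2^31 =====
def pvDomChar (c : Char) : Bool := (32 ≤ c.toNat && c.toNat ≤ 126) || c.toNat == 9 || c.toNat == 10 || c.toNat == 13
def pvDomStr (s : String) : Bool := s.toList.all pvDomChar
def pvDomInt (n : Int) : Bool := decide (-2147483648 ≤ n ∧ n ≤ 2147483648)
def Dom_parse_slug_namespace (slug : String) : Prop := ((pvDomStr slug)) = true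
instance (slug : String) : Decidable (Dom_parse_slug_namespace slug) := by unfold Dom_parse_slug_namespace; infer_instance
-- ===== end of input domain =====

-- B replaces A's six startswith scans by one partition at the first '_' plus a set lookup (idiomatic; same cost).

-- ===== PORT A =====
-- hand port of str.capitalize(): upper-case the first character, lower-case the rest (exact on ASCII)
def pyCapitalize (s : String) : String :=
  match s.toList with
  | [] => ""
  | c :: rest => String.ofList (PySem.Chars.upperChar c :: PySem.Chars.lower rest)

-- hand port of s.rstrip('_'): drop trailing underscores (exact)
def pyRstripUnderscore (s : String) : String :=
  String.ofList ((s.toList.reverse.dropWhile (· == '_')).reverse)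

def pvPrefixes : List String := ["category_", "template_", "help_", "user_", "file_", "kryptopedia_"]

-- the for-loop over namespace_prefixes, returning at the first match
def pvLoopA (slug slug_lower : String) : List String → String × String
  | [] => ("", slug)
  | p :: rest =>
    if PySem.Str.startswith slug_lower p = true then
      (pyCapitalize (pyRstripUnderscore p), PySem.Str.slice slug (some (PySem.Str.len p)) none)
    else pvLoopA slug slug_lower rest

def parse_slug_namespace (slug : String) : String × String :=
  pvLoopA slug (PySem.Str.lower slug) pvPrefixes

-- ===== PORT B =====
-- hand port of slug.partition('_'): none = no '_' in the string; some (head, tail) splits at the FIRST '_' (exact)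
def pyPartitionU : List Char → Option (List Char × List Char)
  | [] => none
  | c :: rest =>
    if c == '_' then some ([], rest)
    else match pyPartitionU rest with
         | none => none
         | some (h, t) => some (c :: h, t)

-- the set {'category', …} of bare namespace names (distinct elements)
def pvNames : List String := ["category", "template", "help", "user", "file", "kryptopedia"]

def parse_slug_namespace_alt (slug : String) : String × String :=
  match pyPartitionU slug.toList with
  | none => ("", slug)
  | some (h, t) =>
    let name := PySem.Str.lower (String.ofList h)
    if name ∈ pvNames then (pyCapitalize name, String.ofList t) else ("", slug)

-- ===== PRECONDITION & SPEC =====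
def Spec_parse_slug_namespace (slug : String) (out : String × String) : Prop := out = parse_slug_namespace_alt slug
instance (slug : String) (out : String × String) : Decidable (Spec_parse_slug_namespace slug out) := by unfold Spec_parse_slug_namespace; infer_instance

-- ===== CLAIM (what is proved, stated in full; the proofs are below) =====
def Claim_equal_parse_slug_namespace : Prop := ∀ (slug : String), Dom_parse_slug_namespace slug → Spec_parse_slug_namespace slug (parse_slug_namespace slug)

-- ===== LEMMAS AND PROOFS =====

theorem lowerChar_eq_underscore (c : Char) : PySem.Chars.lowerChar c = '_' ↔ c = '_' := by
  unfold PySem.Chars.lowerChar PySem.Chars.isupper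
  by_cases hA : 'A' ≤ c
  · by_cases hZ : c ≤ 'Z'
    · simp only [hA, hZ, decide_true, Bool.and_self, if_pos]
      constructor
      · intro hEq
        exfalso
        have h1 : (65 : Nat) ≤ c.toNat := hA
        have h3 := congrArg Char.toNat hEq
        rw [Char.toNat_ofNat] at h3
        have hv : (c.toNat + 32).isValidChar := by
          left
          have h2 : c.toNat ≤ 90 := hZ
          omega
        rw [if_pos hv] at h3
        have h95 : ('_' : Char).toNat = 95 := rfl
        omega
      · intro h; subst h; exact absurd hZ (by decide)
    · simp [hZ]
  · simp [hA]

theorem mem_underscore_lower (l : List Char) : '_' ∈ PySem.Chars.lower l ↔ '_' ∈ l := by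
  simp only [PySem.Chars.lower, List.mem_map]
  constructor
  · rintro ⟨a, ha, e⟩
    rw [← (lowerChar_eq_underscore a).mp e]
    exact (lowerChar_eq_underscore a).mp e ▸ ha
  · intro h; exact ⟨'_', h, (lowerChar_eq_underscore '_').mpr rfl⟩

theorem partitionU_none : ∀ {cs : List Char}, pyPartitionU cs = none → '_' ∉ cs := by
  intro cs
  induction cs with
  | nil => simp
  | cons c rest ih =>
    intro hp hm
    by_cases hc : c = '_'
    · simp [pyPartitionU, hc] at hp
    · have hc' : (c == '_') = false := by simp [hc]
      cases hr : pyPartitionU rest with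
      | none =>
        rcases List.mem_cons.mp hm with e | e
        · exact hc e.symm
        · exact ih hr e
      | some pr =>
        obtain ⟨h, t⟩ := pr
        simp [pyPartitionU, hc', hr] at hp

theorem partitionU_some : ∀ {cs h t : List Char}, pyPartitionU cs = some (h, t) →
    cs = h ++ '_' :: t ∧ '_' ∉ h := by
  intro cs
  induction cs with
  | nil => intro h t hp; simp [pyPartitionU] at hp
  | cons c rest ih =>
    intro h t hp
    by_cases hc : c = '_'
    · subst hc
      simp [pyPartitionU] at hp
      obtain ⟨h1, h2⟩ := hp
      subst h1; subst h2
      simp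
    · have hc' : (c == '_') = false := by simp [hc]
      cases hr : pyPartitionU rest with
      | none => simp [pyPartitionU, hc', hr] at hp
      | some pr =>
        obtain ⟨h', t'⟩ := pr
        simp [pyPartitionU, hc', hr] at hp
        obtain ⟨h1, h2⟩ := hp
        obtain ⟨hr1, hr2⟩ := ih hr
        subst h1; subst h2
        constructor
        · simp [hr1]
        · intro hm
          rcases List.mem_cons.mp hm with e | e
          · exact hc e.symm
          · exact hr2 e

theorem prefix_under (n : List Char) : ∀ (h' t' : List Char), '_' ∉ n → '_' ∉ h' →
    ((n ++ ['_'] <+: h' ++ '_' :: t') ↔ n = h') := by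
  induction n with
  | nil =>
    intro h' t' _ hh
    cases h' with
    | nil => simp
    | cons c h'' =>
      simp only [List.nil_append, List.cons_append, List.cons_prefix_cons]
      constructor
      · rintro ⟨e, -⟩; exact (hh (by simp [← e])).elim
      · intro e; simp at e
  | cons a n' ih =>
    intro h' t' hn hh
    cases h' with
    | nil =>
      simp only [List.cons_append, List.nil_append, List.cons_prefix_cons]
      constructor
      · rintro ⟨e, -⟩; exact (hn (by simp [e])).elim
      · intro e; simp at e
    | cons c h'' =>
      simp only [List.cons_append, List.cons_prefix_cons]
      rw [ih h'' t' (fun m => hn (List.mem_cons_of_mem _ m)) (fun m => hh (List.mem_cons_of_mem _ m))]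
      constructor
      · rintro ⟨rfl, rfl⟩; rfl
      · intro e; injection e with e1 e2; exact ⟨e1, e2⟩

theorem sw_false {slug : String} (hno : '_' ∉ slug.toList) (p : String)
    (hp : '_' ∈ p.toList) : PySem.Str.startswith (PySem.Str.lower slug) p = false := by
  cases hb : PySem.Str.startswith (PySem.Str.lower slug) p with
  | false => rfl
  | true =>
    exfalso
    rw [PySem.Str.startswith_eq, PySem.Str.toList_lower, PySem.Chars.startswith_iff] at hb
    exact hno ((mem_underscore_lower slug.toList).mp (hb.mem hp))

theorem lower_split {slug : String} {h t : List Char} (hcs : slug.toList = h ++ '_' :: t) :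
    (PySem.Str.lower slug).toList = PySem.Chars.lower h ++ '_' :: PySem.Chars.lower t := by
  rw [PySem.Str.toList_lower, hcs]
  simp [PySem.Chars.lower, (lowerChar_eq_underscore '_').mpr rfl]

theorem sw_iff {slug : String} {h t : List Char} (hcs : slug.toList = h ++ '_' :: t)
    (hh : '_' ∉ h) (n : List Char) (p : String) (hp : p.toList = n ++ ['_']) (hn : '_' ∉ n) :
    (PySem.Str.startswith (PySem.Str.lower slug) p = true ↔ n = PySem.Chars.lower h) := by
  rw [PySem.Str.startswith_eq, PySem.Chars.startswith_iff, lower_split hcs, hp]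
  exact prefix_under n _ _ hn (fun m => hh ((mem_underscore_lower h).mp m))

theorem length_lower (h : List Char) : (PySem.Chars.lower h).length = h.length := by
  simp [PySem.Chars.lower]

theorem slice_snd {slug : String} {h t : List Char} (hcs : slug.toList = h ++ '_' :: t)
    {k : Nat} (hk : h.length = k) (a : Int) (ha : a = ((k + 1 : Nat) : Int)) :
    PySem.Str.slice slug (some a) none = String.ofList t := by
  apply String.toList_inj.mp
  rw [PySem.Str.toList_slice, PySem.Chars.slice_eq_listSlice, ha,
    PySem.List.slice_from_natCast, hcs]
  have he : h ++ '_' :: t = (h ++ ['_']) ++ t := by simp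
  rw [he, show k + 1 = (h ++ ['_']).length by simp [hk]]
  simp

theorem name_eq {h : List Char} (s : String)
    (e : s.toList = PySem.Chars.lower h) : PySem.Str.lower (String.ofList h) = s := by
  apply String.toList_inj.mp
  rw [PySem.Str.toList_lower, e]
  simp

theorem lower_ofList_toList (h : List Char) :
    (PySem.Str.lower (String.ofList h)).toList = PySem.Chars.lower h := by
  rw [PySem.Str.toList_lower]; simp

-- ===== VERDICT (by name: the statement is the Claim_ definition above) =====

theorem parse_slug_namespace_spec : Claim_equal_parse_slug_namespace := by
  intro slug _
  unfold Spec_parse_slug_namespace parse_slug_namespace parse_slug_namespace_alt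
  cases hp : pyPartitionU slug.toList with
  | none =>
    have hno := partitionU_none hp
    simp only [pvLoopA, pvPrefixes]
    rw [sw_false hno "category_" (by decide), if_neg (show ¬(false = true) by decide),
      sw_false hno "template_" (by decide), if_neg (show ¬(false = true) by decide),
      sw_false hno "help_" (by decide), if_neg (show ¬(false = true) by decide),
      sw_false hno "user_" (by decide), if_neg (show ¬(false = true) by decide),
      sw_false hno "file_" (by decide), if_neg (show ¬(false = true) by decide),
      sw_false hno "kryptopedia_" (by decide), if_neg (show ¬(false = true) by decide)]
  | some pr =>
    obtain ⟨h, t⟩ := pr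
    obtain ⟨hcs, hh⟩ := partitionU_some hp
    have s1 := sw_iff hcs hh "category".toList "category_" (by decide) (by decide)
    have s2 := sw_iff hcs hh "template".toList "template_" (by decide) (by decide)
    have s3 := sw_iff hcs hh "help".toList "help_" (by decide) (by decide)
    have s4 := sw_iff hcs hh "user".toList "user_" (by decide) (by decide)
    have s5 := sw_iff hcs hh "file".toList "file_" (by decide) (by decide)
    have s6 := sw_iff hcs hh "kryptopedia".toList "kryptopedia_" (by decide) (by decide)
    by_cases e1 : "category".toList = PySem.Chars.lower h
    · have hk : h.length = 8 := by
        have := congrArg List.length e1; rw [length_lower] at this; simpa using this.symm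
      simp only [pvLoopA, pvPrefixes]
      rw [s1.mpr e1, if_pos (show (true = true) from rfl)]
      rw [name_eq _ e1, if_pos (show ("category" : String) ∈ pvNames by decide)]
      rw [show pyCapitalize (pyRstripUnderscore "category_") = pyCapitalize "category" by decide,
        slice_snd hcs hk _ (by decide)]
    by_cases e2 : "template".toList = PySem.Chars.lower h
    · have hk : h.length = 8 := by
        have := congrArg List.length e2; rw [length_lower] at this; simpa using this.symm
      have f1 : PySem.Str.startswith (PySem.Str.lower slug) "category_" = false := by
        cases hb : PySem.Str.startswith (PySem.Str.lower slug) "category_" with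
        | false => rfl
        | true => exact absurd (s1.mp hb) e1
      simp only [pvLoopA, pvPrefixes]
      rw [f1, if_neg (show ¬(false = true) by decide)]
      rw [s2.mpr e2, if_pos (show (true = true) from rfl)]
      rw [name_eq _ e2, if_pos (show ("template" : String) ∈ pvNames by decide)]
      rw [show pyCapitalize (pyRstripUnderscore "template_") = pyCapitalize "template" by decide,
        slice_snd hcs hk _ (by decide)]
    by_cases e3 : "help".toList = PySem.Chars.lower h
    · have hk : h.length = 4 := by
        have := congrArg List.length e3; rw [length_lower] at this; simpa using this.symm
      have f1 : PySem.Str.startswith (PySem.Str.lower slug) "category_" = false := by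
        cases hb : PySem.Str.startswith (PySem.Str.lower slug) "category_" with
        | false => rfl
        | true => exact absurd (s1.mp hb) e1
      have f2 : PySem.Str.startswith (PySem.Str.lower slug) "template_" = false := by
        cases hb : PySem.Str.startswith (PySem.Str.lower slug) "template_" with
        | false => rfl
        | true => exact absurd (s2.mp hb) e2
      simp only [pvLoopA, pvPrefixes]
      rw [f1, if_neg (show ¬(false = true) by decide)]
      rw [f2, if_neg (show ¬(false = true) by decide)]
      rw [s3.mpr e3, if_pos (show (true = true) from rfl)]
      rw [name_eq _ e3, if_pos (show ("help" : String) ∈ pvNames by decide)]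
      rw [show pyCapitalize (pyRstripUnderscore "help_") = pyCapitalize "help" by decide,
        slice_snd hcs hk _ (by decide)]
    by_cases e4 : "user".toList = PySem.Chars.lower h
    · have hk : h.length = 4 := by
        have := congrArg List.length e4; rw [length_lower] at this; simpa using this.symm
      have f1 : PySem.Str.startswith (PySem.Str.lower slug) "category_" = false := by
        cases hb : PySem.Str.startswith (PySem.Str.lower slug) "category_" with
        | false => rfl
        | true => exact absurd (s1.mp hb) e1
      have f2 : PySem.Str.startswith (PySem.Str.lower slug) "template_" = false := by
        cases hb : PySem.Str.startswith (PySem.Str.lower slug) "template_" with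
        | false => rfl
        | true => exact absurd (s2.mp hb) e2
      have f3 : PySem.Str.startswith (PySem.Str.lower slug) "help_" = false := by
        cases hb : PySem.Str.startswith (PySem.Str.lower slug) "help_" with
        | false => rfl
        | true => exact absurd (s3.mp hb) e3
      simp only [pvLoopA, pvPrefixes]
      rw [f1, if_neg (show ¬(false = true) by decide)]
      rw [f2, if_neg (show ¬(false = true) by decide)]
      rw [f3, if_neg (show ¬(false = true) by decide)]
      rw [s4.mpr e4, if_pos (show (true = true) from rfl)]
      rw [name_eq _ e4, if_pos (show ("user" : String) ∈ pvNames by decide)]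
      rw [show pyCapitalize (pyRstripUnderscore "user_") = pyCapitalize "user" by decide,
        slice_snd hcs hk _ (by decide)]
    by_cases e5 : "file".toList = PySem.Chars.lower h
    · have hk : h.length = 4 := by
        have := congrArg List.length e5; rw [length_lower] at this; simpa using this.symm
      have f1 : PySem.Str.startswith (PySem.Str.lower slug) "category_" = false := by
        cases hb : PySem.Str.startswith (PySem.Str.lower slug) "category_" with
        | false => rfl
        | true => exact absurd (s1.mp hb) e1
      have f2 : PySem.Str.startswith (PySem.Str.lower slug) "template_" = false := by
        cases hb : PySem.Str.startswith (PySem.Str.lower slug) "template_" with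
        | false => rfl
        | true => exact absurd (s2.mp hb) e2
      have f3 : PySem.Str.startswith (PySem.Str.lower slug) "help_" = false := by
        cases hb : PySem.Str.startswith (PySem.Str.lower slug) "help_" with
        | false => rfl
        | true => exact absurd (s3.mp hb) e3
      have f4 : PySem.Str.startswith (PySem.Str.lower slug) "user_" = false := by
        cases hb : PySem.Str.startswith (PySem.Str.lower slug) "user_" with
        | false => rfl
        | true => exact absurd (s4.mp hb) e4
      simp only [pvLoopA, pvPrefixes]
      rw [f1, if_neg (show ¬(false = true) by decide)]
      rw [f2, if_neg (show ¬(false = true) by decide)]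
      rw [f3, if_neg (show ¬(false = true) by decide)]
      rw [f4, if_neg (show ¬(false = true) by decide)]
      rw [s5.mpr e5, if_pos (show (true = true) from rfl)]
      rw [name_eq _ e5, if_pos (show ("file" : String) ∈ pvNames by decide)]
      rw [show pyCapitalize (pyRstripUnderscore "file_") = pyCapitalize "file" by decide,
        slice_snd hcs hk _ (by decide)]
    by_cases e6 : "kryptopedia".toList = PySem.Chars.lower h
    · have hk : h.length = 11 := by
        have := congrArg List.length e6; rw [length_lower] at this; simpa using this.symm
      have f1 : PySem.Str.startswith (PySem.Str.lower slug) "category_" = false := by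
        cases hb : PySem.Str.startswith (PySem.Str.lower slug) "category_" with
        | false => rfl
        | true => exact absurd (s1.mp hb) e1
      have f2 : PySem.Str.startswith (PySem.Str.lower slug) "template_" = false := by
        cases hb : PySem.Str.startswith (PySem.Str.lower slug) "template_" with
        | false => rfl
        | true => exact absurd (s2.mp hb) e2
      have f3 : PySem.Str.startswith (PySem.Str.lower slug) "help_" = false := by
        cases hb : PySem.Str.startswith (PySem.Str.lower slug) "help_" with
        | false => rfl
        | true => exact absurd (s3.mp hb) e3
      have f4 : PySem.Str.startswith (PySem.Str.lower slug) "user_" = false := by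
        cases hb : PySem.Str.startswith (PySem.Str.lower slug) "user_" with
        | false => rfl
        | true => exact absurd (s4.mp hb) e4
      have f5 : PySem.Str.startswith (PySem.Str.lower slug) "file_" = false := by
        cases hb : PySem.Str.startswith (PySem.Str.lower slug) "file_" with
        | false => rfl
        | true => exact absurd (s5.mp hb) e5
      simp only [pvLoopA, pvPrefixes]
      rw [f1, if_neg (show ¬(false = true) by decide)]
      rw [f2, if_neg (show ¬(false = true) by decide)]
      rw [f3, if_neg (show ¬(false = true) by decide)]
      rw [f4, if_neg (show ¬(false = true) by decide)]
      rw [f5, if_neg (show ¬(false = true) by decide)]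
      rw [s6.mpr e6, if_pos (show (true = true) from rfl)]
      rw [name_eq _ e6, if_pos (show ("kryptopedia" : String) ∈ pvNames by decide)]
      rw [show pyCapitalize (pyRstripUnderscore "kryptopedia_") = pyCapitalize "kryptopedia" by decide,
        slice_snd hcs hk _ (by decide)]
    have f1 : PySem.Str.startswith (PySem.Str.lower slug) "category_" = false := by
      cases hb : PySem.Str.startswith (PySem.Str.lower slug) "category_" with
      | false => rfl
      | true => exact absurd (s1.mp hb) e1
    have f2 : PySem.Str.startswith (PySem.Str.lower slug) "template_" = false := by
      cases hb : PySem.Str.startswith (PySem.Str.lower slug) "template_" with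
      | false => rfl
      | true => exact absurd (s2.mp hb) e2
    have f3 : PySem.Str.startswith (PySem.Str.lower slug) "help_" = false := by
      cases hb : PySem.Str.startswith (PySem.Str.lower slug) "help_" with
      | false => rfl
      | true => exact absurd (s3.mp hb) e3
    have f4 : PySem.Str.startswith (PySem.Str.lower slug) "user_" = false := by
      cases hb : PySem.Str.startswith (PySem.Str.lower slug) "user_" with
      | false => rfl
      | true => exact absurd (s4.mp hb) e4
    have f5 : PySem.Str.startswith (PySem.Str.lower slug) "file_" = false := by
      cases hb : PySem.Str.startswith (PySem.Str.lower slug) "file_" with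
      | false => rfl
      | true => exact absurd (s5.mp hb) e5
    have f6 : PySem.Str.startswith (PySem.Str.lower slug) "kryptopedia_" = false := by
      cases hb : PySem.Str.startswith (PySem.Str.lower slug) "kryptopedia_" with
      | false => rfl
      | true => exact absurd (s6.mp hb) e6
    have hnm : ¬ (PySem.Str.lower (String.ofList h) ∈ pvNames) := by
      intro hm
      simp only [pvNames, List.mem_cons, List.not_mem_nil, or_false] at hm
      rcases hm with e | e | e | e | e | e
      · exact e1 (by rw [← congrArg String.toList e, lower_ofList_toList])
      · exact e2 (by rw [← congrArg String.toList e, lower_ofList_toList])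
      · exact e3 (by rw [← congrArg String.toList e, lower_ofList_toList])
      · exact e4 (by rw [← congrArg String.toList e, lower_ofList_toList])
      · exact e5 (by rw [← congrArg String.toList e, lower_ofList_toList])
      · exact e6 (by rw [← congrArg String.toList e, lower_ofList_toList])
    simp only [pvLoopA, pvPrefixes]
    rw [f1, if_neg (show ¬(false = true) by decide)]
    rw [f2, if_neg (show ¬(false = true) by decide)]
    rw [f3, if_neg (show ¬(false = true) by decide)]
    rw [f4, if_neg (show ¬(false = true) by decide)]
    rw [f5, if_neg (show ¬(false = true) by decide)]
    rw [f6, if_neg (show ¬(false = true) by decide)]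
    rw [if_neg hnm]
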